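-- pv_equiv track=rewrite | github.com/michi-system/Reseller | scripts/generate_daily_report.py | _detect_scope
-- ===== SOURCE A (Python) =====
-- from typing import Dict, List, Sequence
--
-- def _detect_scope(files: List[str]) -> List[str]:
--     scope = set()
--     for path in files:
--         if path.startswith("docs/"):
--             scope.add("Docs")
--         if path.startswith("reselling/") or path.startswith("scripts/"):
--             scope.add("Miner")
--         if path.startswith("operator/") or path.startswith("listing_ops/"):
--             scope.add("Operator")
--         if path.startswith(".github/"):
--             scope.add("Shared")
--     if not scope:
--         scope.add("Shared")
--     if "Miner" in scope and "Operator" in scope: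
--         scope.add("Shared")
--     return sorted(scope)
-- ===== SOURCE B (Python) =====
-- from typing import List
--
-- # Precomputed answers for every 4-bit match mask (bit0=Docs, bit1=Miner,
-- # bit2=Operator, bit3=Shared); the empty-scope and Miner+Operator fixups and
-- # the sorting are baked into the table, so the pass over the files only
-- # accumulates a bitmask.
-- _TABLE = [
--     ["Shared"],
--     ["Docs"],
--     ["Miner"],
--     ["Docs", "Miner"],
--     ["Operator"],
--     ["Docs", "Operator"],
--     ["Miner", "Operator", "Shared"],
--     ["Docs", "Miner", "Operator", "Shared"],
--     ["Shared"],
--     ["Docs", "Shared"],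
--     ["Miner", "Shared"],
--     ["Docs", "Miner", "Shared"],
--     ["Operator", "Shared"],
--     ["Docs", "Operator", "Shared"],
--     ["Miner", "Operator", "Shared"],
--     ["Docs", "Miner", "Operator", "Shared"],
-- ]
--
-- def _detect_scope(files: List[str]) -> List[str]:
--     mask = 0
--     for p in files:
--         mask |= (p.startswith("docs/")
--                  | (p.startswith("reselling/") or p.startswith("scripts/")) << 1
--                  | (p.startswith("operator/") or p.startswith("listing_ops/")) << 2
--                  | p.startswith(".github/") << 3)
--     return _TABLE[mask]
-- ===== Notes on version B (the rewrite author's own statement) =====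
-- stated objective: alternative
-- what changed: Replaces set-building, the two fixups and sorted() by a single pass that ORs each file's four prefix tests into a 4-bit mask and returns the precomputed answer from a 16-entry lookup table in which the fixups and the sort order are baked in.
import Mathlib
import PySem

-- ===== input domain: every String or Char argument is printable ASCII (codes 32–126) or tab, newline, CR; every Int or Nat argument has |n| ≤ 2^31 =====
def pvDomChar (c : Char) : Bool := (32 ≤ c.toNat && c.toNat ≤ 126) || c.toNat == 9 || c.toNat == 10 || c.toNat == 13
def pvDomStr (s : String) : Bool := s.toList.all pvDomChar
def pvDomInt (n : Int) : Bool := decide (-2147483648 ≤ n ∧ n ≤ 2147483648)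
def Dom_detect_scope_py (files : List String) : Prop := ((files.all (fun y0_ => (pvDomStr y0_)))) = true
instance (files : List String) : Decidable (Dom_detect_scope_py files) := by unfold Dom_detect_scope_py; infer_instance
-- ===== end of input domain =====

-- B replaces A's set-building, fixups and sorting by a single pass that ORs each
-- file's four prefix tests into a 4-bit mask and indexes a precomputed 16-entry table.

-- ===== PORT A =====
-- body of A's 'for path in files' loop: the four startswith tests, in order
def pvStepA (scope : PySem.Set String) (path : String) : PySem.Set String :=
  let scope := if PySem.Str.startswith path "docs/" then PySem.Set.add scope "Docs" else scope
  let scope := if PySem.Str.startswith path "reselling/" || PySem.Str.startswith path "scripts/" then PySem.Set.add scope "Miner" else scope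
  let scope := if PySem.Str.startswith path "operator/" || PySem.Str.startswith path "listing_ops/" then PySem.Set.add scope "Operator" else scope
  if PySem.Str.startswith path ".github/" then PySem.Set.add scope "Shared" else scope

def detect_scope_py (files : List String) : List String :=
  let scope := files.foldl pvStepA PySem.Set.empty
  let scope := if scope = [] then PySem.Set.add scope "Shared" else scope
  let scope := if PySem.Set.contains scope "Miner" && PySem.Set.contains scope "Operator" then PySem.Set.add scope "Shared" else scope
  PySem.List.sorted scope (fun x => x) false

-- ===== PORT B =====
-- the precomputed 16-entry table _TABLE (bit0=Docs, bit1=Miner, bit2=Operator, bit3=Shared)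
def pvTable : List (List String) :=
  [["Shared"], ["Docs"], ["Miner"], ["Docs", "Miner"],
   ["Operator"], ["Docs", "Operator"], ["Miner", "Operator", "Shared"],
   ["Docs", "Miner", "Operator", "Shared"],
   ["Shared"], ["Docs", "Shared"], ["Miner", "Shared"], ["Docs", "Miner", "Shared"],
   ["Operator", "Shared"], ["Docs", "Operator", "Shared"],
   ["Miner", "Operator", "Shared"], ["Docs", "Miner", "Operator", "Shared"]]

-- one file's contribution to the mask (the OR-ed expression in B's loop body)
def pvEnc (p : String) : Nat :=
  (if PySem.Str.startswith p "docs/" then 1 else 0) |||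
  ((if PySem.Str.startswith p "reselling/" || PySem.Str.startswith p "scripts/" then 1 else 0) <<< 1) |||
  ((if PySem.Str.startswith p "operator/" || PySem.Str.startswith p "listing_ops/" then 1 else 0) <<< 2) |||
  ((if PySem.Str.startswith p ".github/" then 1 else 0) <<< 3)

def detect_scope_py_alt (files : List String) : List String :=
  let mask := files.foldl (fun m p => m ||| pvEnc p) 0
  pvTable.getD mask []   -- mask < 16, so the index is always in range

-- ===== PRECONDITION & SPEC =====
def Spec_detect_scope_py (files : List String) (out : List String) : Prop := out = detect_scope_py_alt files
instance (files : List String) (out : List String) : Decidable (Spec_detect_scope_py files out) := by unfold Spec_detect_scope_py; infer_instance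

-- ===== CLAIM =====
def Claim_equal_detect_scope_py : Prop := ∀ (files : List String), Dom_detect_scope_py files → Spec_detect_scope_py files (detect_scope_py files)

-- ===== LEMMAS AND PROOFS =====

-- the four per-path predicates shared by both programs
def pvPD (p : String) : Bool := PySem.Str.startswith p "docs/"
def pvPM (p : String) : Bool := PySem.Str.startswith p "reselling/" || PySem.Str.startswith p "scripts/"
def pvPO (p : String) : Bool := PySem.Str.startswith p "operator/" || PySem.Str.startswith p "listing_ops/"
def pvPS (p : String) : Bool := PySem.Str.startswith p ".github/"

-- the common result as a function of the four "some file matches" booleans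
def pvTarget (d m o s : Bool) : List String :=
  let s := s || (!d && !m && !o) || (m && o)
  (if d then ["Docs"] else []) ++ (if m then ["Miner"] else []) ++
  (if o then ["Operator"] else []) ++ (if s then ["Shared"] else [])

-- the mask as a function of the same four booleans
def pvEncode (d m o s : Bool) : Nat :=
  (if d then 1 else 0) ||| (if m then 2 else 0) ||| (if o then 4 else 0) ||| (if s then 8 else 0)

lemma sorted_of_mem_iff (T L : List String) (hT : T.Nodup)
    (hL : L.Pairwise (fun a b => a < b)) (h : ∀ x, x ∈ T ↔ x ∈ L) :
    PySem.List.sorted T (fun x => x) false = L := by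
  apply PySem.List.sorted_eq_of_perm_of_pairwise_lt
  · exact (List.perm_ext_iff_of_nodup (hL.imp (fun hab => ne_of_lt hab)) hT).2
      (fun a => (h a).symm)
  · exact hL

lemma mem_stepA (S : PySem.Set String) (p : String) (x : String) :
    x ∈ pvStepA S p ↔ x ∈ S ∨ (x = "Docs" ∧ pvPD p) ∨ (x = "Miner" ∧ pvPM p) ∨
      (x = "Operator" ∧ pvPO p) ∨ (x = "Shared" ∧ pvPS p) := by
  unfold pvStepA pvPD pvPM pvPO pvPS
  split_ifs <;> simp_all [PySem.Set.mem_add] <;> tauto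

lemma nodup_stepA (S : PySem.Set String) (p : String) (h : S.Nodup) :
    (pvStepA S p).Nodup := by
  unfold pvStepA
  split_ifs <;> (repeat' apply PySem.Set.nodup_add) <;> exact h

set_option maxHeartbeats 1000000 in
lemma mem_foldlA (files : List String) (S : PySem.Set String) (x : String) :
    x ∈ files.foldl pvStepA S ↔ x ∈ S ∨ (x = "Docs" ∧ files.any pvPD) ∨
      (x = "Miner" ∧ files.any pvPM) ∨ (x = "Operator" ∧ files.any pvPO) ∨
      (x = "Shared" ∧ files.any pvPS) := by
  induction files generalizing S with
  | nil => simp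
  | cons p fs ih =>
      simp only [List.foldl_cons, ih, mem_stepA, List.any_cons, Bool.or_eq_true]
      tauto

lemma nodup_foldlA (files : List String) (S : PySem.Set String) (h : S.Nodup) :
    (files.foldl pvStepA S).Nodup := by
  induction files generalizing S with
  | nil => exact h
  | cons p fs ih => exact ih _ (nodup_stepA _ _ h)

lemma pvTarget_pairwise (d m o s : Bool) : (pvTarget d m o s).Pairwise (fun a b => a < b) := by
  rcases d <;> rcases m <;> rcases o <;> rcases s <;>
    simp [pvTarget, List.pairwise_cons, String.lt_iff_toList_lt] <;> decide

lemma finalize (S : PySem.Set String) (d m o s : Bool) (hnd : S.Nodup)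
    (hmem : ∀ x, x ∈ S ↔ (x = "Docs" ∧ d = true) ∨ (x = "Miner" ∧ m = true) ∨
      (x = "Operator" ∧ o = true) ∨ (x = "Shared" ∧ s = true)) :
    (let S1 := if S = [] then PySem.Set.add S "Shared" else S;
     let S2 := if PySem.Set.contains S1 "Miner" && PySem.Set.contains S1 "Operator" then PySem.Set.add S1 "Shared" else S1;
     PySem.List.sorted S2 (fun x => x) false) = pvTarget d m o s := by
  by_cases hnil : S = []
  · have hd : d = false := by
      rcases d with _ | _; · rfl
      exact absurd ((hmem "Docs").2 (Or.inl ⟨rfl, rfl⟩)) (by simp [hnil])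
    have hm : m = false := by
      rcases m with _ | _; · rfl
      exact absurd ((hmem "Miner").2 (Or.inr (Or.inl ⟨rfl, rfl⟩))) (by simp [hnil])
    have ho : o = false := by
      rcases o with _ | _; · rfl
      exact absurd ((hmem "Operator").2 (Or.inr (Or.inr (Or.inl ⟨rfl, rfl⟩)))) (by simp [hnil])
    have hs : s = false := by
      rcases s with _ | _; · rfl
      exact absurd ((hmem "Shared").2 (Or.inr (Or.inr (Or.inr ⟨rfl, rfl⟩)))) (by simp [hnil])
    subst hd hm ho hs
    simp only [hnil]
    decide
  · show PySem.List.sorted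
      (if PySem.Set.contains (if S = [] then PySem.Set.add S "Shared" else S) "Miner" &&
          PySem.Set.contains (if S = [] then PySem.Set.add S "Shared" else S) "Operator"
       then PySem.Set.add (if S = [] then PySem.Set.add S "Shared" else S) "Shared"
       else (if S = [] then PySem.Set.add S "Shared" else S)) (fun x => x) false = pvTarget d m o s
    rw [if_neg hnil]
    have hcm : PySem.Set.contains S "Miner" = m := by
      rcases hc : PySem.Set.contains S "Miner" <;> rcases hm : m <;>
        simp_all [hmem "Miner"]
    have hco : PySem.Set.contains S "Operator" = o := by
      rcases hc : PySem.Set.contains S "Operator" <;> rcases ho : o <;>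
        simp_all [hmem "Operator"]
    rw [hcm, hco]
    have hone : (d || m || o || s) = true := by
      rcases hx : S with _ | ⟨x, rest⟩
      · exact absurd hx hnil
      · have hx' : x ∈ S := by rw [hx]; exact List.mem_cons_self
        rcases (hmem x).1 hx' with ⟨_, h⟩ | ⟨_, h⟩ | ⟨_, h⟩ | ⟨_, h⟩ <;> simp [h]
    by_cases hmo : (m && o) = true
    · rw [if_pos hmo]
      rcases Bool.and_eq_true_iff.1 hmo with ⟨hm, ho⟩
      subst hm ho
      refine sorted_of_mem_iff _ _ (PySem.Set.nodup_add _ _ hnd) (pvTarget_pairwise ..) ?_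
      intro x
      rw [PySem.Set.mem_add, hmem x]
      rcases d <;> rcases s <;> simp [pvTarget] <;> tauto
    · rw [if_neg hmo]
      refine sorted_of_mem_iff _ _ hnd (pvTarget_pairwise ..) ?_
      intro x
      rw [hmem x]
      rcases d <;> rcases m <;> rcases o <;> rcases s <;>
        simp_all [pvTarget]

lemma A_eq (files : List String) :
    detect_scope_py files =
      pvTarget (files.any pvPD) (files.any pvPM) (files.any pvPO) (files.any pvPS) := by
  unfold detect_scope_py
  exact finalize _ _ _ _ _
    (nodup_foldlA files PySem.Set.empty (by simp [PySem.Set.empty]))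
    (fun x => by rw [mem_foldlA]; simp [PySem.Set.empty])

lemma enc_merge (p : String) (d m o s : Bool) :
    pvEnc p ||| pvEncode d m o s =
      pvEncode (pvPD p || d) (pvPM p || m) (pvPO p || o) (pvPS p || s) := by
  unfold pvEnc pvEncode pvPD pvPM pvPO pvPS
  rcases PySem.Str.startswith p "docs/" <;>
  rcases PySem.Str.startswith p "reselling/" <;>
  rcases PySem.Str.startswith p "scripts/" <;>
  rcases PySem.Str.startswith p "operator/" <;>
  rcases PySem.Str.startswith p "listing_ops/" <;>
  rcases PySem.Str.startswith p ".github/" <;>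
  rcases d <;> rcases m <;> rcases o <;> rcases s <;> rfl

lemma foldl_mask (files : List String) (acc : Nat) :
    files.foldl (fun m p => m ||| pvEnc p) acc =
      acc ||| pvEncode (files.any pvPD) (files.any pvPM) (files.any pvPO) (files.any pvPS) := by
  induction files generalizing acc with
  | nil => simp [pvEncode]
  | cons p fs ih =>
      simp only [List.foldl_cons, ih, List.any_cons]
      rw [Nat.lor_assoc, enc_merge]

lemma table_eq (d m o s : Bool) : pvTable.getD (pvEncode d m o s) [] = pvTarget d m o s := by
  rcases d <;> rcases m <;> rcases o <;> rcases s <;> rfl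

lemma B_eq (files : List String) :
    detect_scope_py_alt files =
      pvTarget (files.any pvPD) (files.any pvPM) (files.any pvPO) (files.any pvPS) := by
  unfold detect_scope_py_alt
  rw [foldl_mask]
  show pvTable.getD (0 ||| _) [] = _
  rw [Nat.zero_or, table_eq]

-- ===== VERDICT =====
theorem detect_scope_py_spec : Claim_equal_detect_scope_py := by
  intro files _
  unfold Spec_detect_scope_py
  rw [A_eq, B_eq]
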